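-- pv_equiv track=rewrite | github.com/Muhabaw21/DSA | meera_array.py | meeraArra
-- ===== SOURCE A (Python) =====
-- def meeraArra(numbers):
--     count =0
--     found= False
--     meeraStart = 0
--     meeraEnd = 0
--
--     for num in numbers:
--         if num % 2 != 0:
--             found = True
--             break
--     odd_flag =False
--     for num in numbers:
--         if num % 2 == 0 and not odd_flag:
--             meeraStart += 1
--         else:
--             odd_flag = True
--     for num in reversed(numbers):
--         if num % 2 == 0:
--             meeraEnd += 1
--         else:
--             break
--     if meeraEnd == meeraStart and found:
--         return True
--     else:
--         return False
-- ===== SOURCE B (Python) =====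
-- def meeraArra(numbers):
--     odd_indices = [i for i, n in enumerate(numbers) if n % 2 != 0]
--     if not odd_indices:
--         return False
--     return odd_indices[0] == len(numbers) - 1 - odd_indices[-1]
-- ===== Notes on version B (the rewrite author's own statement) =====
-- stated objective: simpler
-- what changed: Replaces three run-scanning loops (find-odd, count leading evens with a flag, count trailing evens over reversed) with one pass collecting the indices of odd elements and an arithmetic comparison of the first and last odd index.
import Mathlib
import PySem

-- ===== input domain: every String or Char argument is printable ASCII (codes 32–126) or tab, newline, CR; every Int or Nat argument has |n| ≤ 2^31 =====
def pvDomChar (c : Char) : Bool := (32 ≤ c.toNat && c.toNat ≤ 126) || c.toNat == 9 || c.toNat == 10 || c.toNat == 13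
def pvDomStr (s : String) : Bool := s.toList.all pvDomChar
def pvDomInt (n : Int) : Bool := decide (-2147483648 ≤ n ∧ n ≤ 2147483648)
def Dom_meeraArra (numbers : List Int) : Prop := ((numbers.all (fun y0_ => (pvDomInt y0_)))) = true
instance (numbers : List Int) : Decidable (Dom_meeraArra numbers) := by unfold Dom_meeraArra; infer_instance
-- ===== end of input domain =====

-- B replaces A's three run-scanning loops by one pass collecting odd-element indices
-- plus an arithmetic comparison of first and last odd index (objective: simpler).

-- shared parity tests: Python 'n % 2 == 0' / 'n % 2 != 0'
def pyEven (n : Int) : Bool := PySem.Int.mod n 2 == 0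
def pyOdd (n : Int) : Bool := PySem.Int.mod n 2 != 0

-- ===== PORT A =====
-- first loop: 'for num in numbers: if num % 2 != 0: found = True; break'
def meeraFound : List Int → Bool
  | [] => false
  | n :: t => if pyOdd n then true else meeraFound t

-- second loop: counts meeraStart with the odd_flag state
def meeraStartLoop : List Int → Int → Bool → Int
  | [], c, _ => c
  | n :: t, c, flag =>
      if pyEven n && !flag then meeraStartLoop t (c + 1) flag
      else meeraStartLoop t c true

-- third loop: 'for num in reversed(numbers): … else: break'
def meeraEndLoop : List Int → Int
  | [] => 0
  | n :: t => if pyEven n then 1 + meeraEndLoop t else 0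

def meeraArra (numbers : List Int) : Bool :=
  let found := meeraFound numbers
  let meeraStart := meeraStartLoop numbers 0 false
  let meeraEnd := meeraEndLoop numbers.reverse
  if meeraEnd = meeraStart ∧ found = true then true else false

-- ===== PORT B =====
-- '[i for i, n in enumerate(numbers) if n % 2 != 0]' (general start index, for the lemmas)
def oddIdxF (l : List Int) (s : Int) : List Int :=
  ((PySem.List.enumerate l s).filter (fun p => pyOdd p.2)).map Prod.fst

def meeraArra_alt (numbers : List Int) : Bool :=
  let odd_indices := oddIdxF numbers 0
  match odd_indices.head?, odd_indices.getLast? with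
  | some i, some j => decide (i = (numbers.length : Int) - 1 - j)
  | _, _ => false

-- ===== PRECONDITION & SPEC =====
def Spec_meeraArra (numbers : List Int) (out : Bool) : Prop := out = meeraArra_alt numbers
instance (numbers : List Int) (out : Bool) : Decidable (Spec_meeraArra numbers out) := by unfold Spec_meeraArra; infer_instance

-- ===== CLAIM (what is proved, stated in full; the proofs are below) =====
def Claim_equal_meeraArra : Prop := ∀ (numbers : List Int), Dom_meeraArra numbers → Spec_meeraArra numbers (meeraArra numbers)

-- ===== LEMMAS AND PROOFS =====

theorem pyOdd_eq_not_even (n : Int) : pyOdd n = !pyEven n := rfl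

theorem startLoop_true (l : List Int) (c : Int) : meeraStartLoop l c true = c := by
  induction l generalizing c with
  | nil => rfl
  | cons n t ih => simp [meeraStartLoop, ih]

theorem startLoop_false (l : List Int) (c : Int) :
    meeraStartLoop l c false = c + ((l.takeWhile pyEven).length : Int) := by
  induction l generalizing c with
  | nil => simp [meeraStartLoop]
  | cons n t ih =>
    by_cases h : pyEven n = true
    · rw [List.takeWhile_cons_of_pos h]
      simp only [meeraStartLoop, h, Bool.not_false, Bool.and_self, if_pos, ih,
        List.length_cons]
      push_cast; ring
    · rw [List.takeWhile_cons_of_neg (by simp [h])]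
      simp only [meeraStartLoop]
      rw [if_neg (by simp [h])]
      simp [startLoop_true]

theorem head_oddIdx (l : List Int) (s : Int) :
    (oddIdxF l s).head? =
      if meeraFound l = true then some (s + ((l.takeWhile pyEven).length : Int))
      else none := by
  induction l generalizing s with
  | nil => simp [oddIdxF, meeraFound]
  | cons n t ih =>
    by_cases h : pyEven n = true
    · have h' : pyOdd n = false := by rw [pyOdd_eq_not_even, h]; rfl
      rw [List.takeWhile_cons_of_pos h]
      simp only [oddIdxF, PySem.List.enumerate_cons, List.filter_cons, h', meeraFound,
        Bool.false_eq_true, if_false]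
      rw [show (List.map Prod.fst (List.filter (fun p => pyOdd p.2)
            (PySem.List.enumerate t (s+1)))) = oddIdxF t (s+1) from rfl, ih]
      by_cases hf : meeraFound t = true <;> simp only [hf, if_true, if_false,
        Bool.false_eq_true, Option.some.injEq, List.length_cons] <;> try rfl
      push_cast; ring
    · have h' : pyOdd n = true := by rw [pyOdd_eq_not_even]; simp [h]
      rw [List.takeWhile_cons_of_neg (by simp [h])]
      simp [oddIdxF, PySem.List.enumerate_cons, h', meeraFound]

-- endLoop over the reverse vs the last odd index
theorem endLoop_last (l : List Int) (s : Int) :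
    (match (oddIdxF l s).getLast? with
      | none => meeraEndLoop l.reverse = (l.length : Int)
      | some j => meeraEndLoop l.reverse = (l.length : Int) - 1 - j + s) := by
  induction l using List.reverseRecOn generalizing s with
  | nil => simp [oddIdxF, meeraEndLoop]
  | append_singleton t n ih =>
    have hsplit : oddIdxF (t ++ [n]) s = oddIdxF t s ++ oddIdxF [n] (s + t.length) := by
      simp [oddIdxF, PySem.List.enumerate_append]
    by_cases h : pyEven n = true
    · have h' : pyOdd n = false := by rw [pyOdd_eq_not_even, h]; rfl
      have h1 : oddIdxF [n] (s + t.length) = [] := by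
        simp [oddIdxF, PySem.List.enumerate_cons, PySem.List.enumerate_nil, List.filter, h']
      have h2 : meeraEndLoop (t ++ [n]).reverse = 1 + meeraEndLoop t.reverse := by
        simp [meeraEndLoop, h]
      rw [hsplit, h1, List.append_nil, h2]
      have := ih s
      rcases hg : (oddIdxF t s).getLast? with _ | j <;> rw [hg] at this <;>
        simp only [this, List.length_append, List.length_singleton] <;> push_cast <;> ring
    · have h' : pyOdd n = true := by rw [pyOdd_eq_not_even]; simp [h]
      have h1 : oddIdxF [n] (s + t.length) = [s + t.length] := by
        simp [oddIdxF, PySem.List.enumerate_cons, PySem.List.enumerate_nil, List.filter, h']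
      have h2 : meeraEndLoop (t ++ [n]).reverse = 0 := by
        simp [meeraEndLoop, h]
      rw [hsplit, h1, h2]
      simp only [List.getLast?_append, List.getLast?_singleton, Option.some_or,
        List.length_append, List.length_singleton]
      push_cast; ring

-- ===== VERDICT (by name: the statement is the Claim_ definition above) =====
theorem meeraArra_spec : Claim_equal_meeraArra := by
  intro numbers _
  unfold Spec_meeraArra meeraArra meeraArra_alt
  have hhead := head_oddIdx numbers 0
  by_cases hf : meeraFound numbers = true
  · -- odd present: both sides reduce to comparing the two counts
    rw [if_pos hf] at hhead
    have hne : oddIdxF numbers 0 ≠ [] := by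
      intro he; rw [he] at hhead; simp at hhead
    have hlast := endLoop_last numbers 0
    rcases hg : (oddIdxF numbers 0).getLast? with _ | j
    · exact absurd (List.getLast?_eq_none_iff.mp hg) hne
    · rw [hg] at hlast
      simp only [hhead, hg, startLoop_false, hf, hlast, zero_add, and_true]
      by_cases hc : (numbers.length : Int) - 1 - j + 0 = ((numbers.takeWhile pyEven).length : Int)
      · rw [if_pos hc]; symm; rw [decide_eq_true_iff]; omega
      · rw [if_neg hc]; symm; rw [decide_eq_false_iff_not]; omega
  · -- no odd element: A's condition has found = False, B has no odd index
    have hf' : meeraFound numbers = false := by simpa using hf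
    rw [hf'] at hhead; simp at hhead
    simp [hf', hhead]
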